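-- pv_equiv track=rewrite | github.com/VLSIDA/puffery | scripts/strong_puf/crp_util.py | hash_value
-- ===== SOURCE A (Python) =====
-- def hash_value(bit_list):
--     """Given an input, this function will hash the value down to a specific bit length"""
--
--     #This function only works if challenge size=16, output size=4
--     assert(len(bit_list)%2==0)
--     # Assume the 16 challenge length, generalize later
--     # Reduce the list twice
--
--     reduced_list = []
--     for _ in range(2):
--         half_point = len(bit_list)//2
--         first_half = bit_list[:half_point]
--         second_half = bit_list[half_point:]
--
--         reduced_list = []
--         for bit_left,bit_right in zip(first_half, second_half):
--             reduced_list.append(bit_left^bit_right)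
--
--         bit_list = reduced_list
--
--     return bit_list
-- ===== SOURCE B (Python) =====
-- def hash_value(bit_list):
--     """Given an input, this function will hash the value down to a specific bit length"""
--     n = len(bit_list)
--     assert(n % 2 == 0)
--     h = n // 2
--     h2 = h // 2
--     # One pass: each output bit is the XOR of the four original positions that
--     # A's two halving passes would fold onto it.
--     return [bit_list[j] ^ bit_list[j + h2] ^ bit_list[j + h] ^ bit_list[j + h2 + h]
--             for j in range(h2)]
-- ===== Notes on version B (the rewrite author's own statement) =====
-- stated objective: alternative
-- what changed: Replaces A's two sequential halving/zip passes (building an intermediate half-length list) by a single pass that computes each output bit directly as the XOR of four original positions.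
import Mathlib
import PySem

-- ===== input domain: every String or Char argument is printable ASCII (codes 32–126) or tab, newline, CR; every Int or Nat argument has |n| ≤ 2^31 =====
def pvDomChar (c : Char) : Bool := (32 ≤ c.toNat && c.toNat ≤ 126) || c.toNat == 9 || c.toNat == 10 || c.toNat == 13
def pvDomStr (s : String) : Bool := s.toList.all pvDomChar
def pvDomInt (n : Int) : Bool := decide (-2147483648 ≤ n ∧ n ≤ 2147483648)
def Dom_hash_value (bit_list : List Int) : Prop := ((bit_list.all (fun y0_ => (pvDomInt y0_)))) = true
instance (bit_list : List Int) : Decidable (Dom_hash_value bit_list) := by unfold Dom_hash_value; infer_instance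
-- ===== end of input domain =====

-- B replaces A's two halving/zip passes by one direct pass XORing four positions; alternative decomposition, same cost.

-- ===== PORT A =====
-- slices bit_list[:h] / bit_list[h:] with nonnegative in-range h are exactly take/drop
def hash_value (bit_list : List Int) : List Int :=
  (List.range 2).foldl
    (fun l _ =>
      let half_point := l.length / 2
      let first_half := l.take half_point
      let second_half := l.drop half_point
      (first_half.zip second_half).map (fun p => PySem.Int.bxor p.1 p.2))
    bit_list

-- ===== PORT B =====
-- bit_list[j+…] with j in range(h2) is always a nonnegative in-range index, so getD is exact
def hash_value_alt (bit_list : List Int) : List Int :=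
  let n := bit_list.length
  let h := n / 2
  let h2 := h / 2
  (List.range h2).map (fun j =>
    PySem.Int.bxor (PySem.Int.bxor (PySem.Int.bxor (bit_list.getD j 0) (bit_list.getD (j + h2) 0))
      (bit_list.getD (j + h) 0)) (bit_list.getD (j + h2 + h) 0))

-- ===== PRECONDITION & SPEC =====
-- Pre_ excludes odd-length lists, on which A's assert raises AssertionError.
def Pre_hash_value (bit_list : List Int) : Prop := bit_list.length % 2 = 0
instance (bit_list : List Int) : Decidable (Pre_hash_value bit_list) := by unfold Pre_hash_value; infer_instance
def pvWitness_hash_value : List Int := [1, 0, 1, 1]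

def Spec_hash_value (bit_list : List Int) (out : List Int) : Prop := out = hash_value_alt bit_list
instance (bit_list : List Int) (out : List Int) : Decidable (Spec_hash_value bit_list out) := by unfold Spec_hash_value; infer_instance

-- ===== CLAIM (what is proved, stated in full; the proofs are below) =====
def Claim_equal_hash_value : Prop := ∀ (bit_list : List Int), Dom_hash_value bit_list → Pre_hash_value bit_list → Spec_hash_value bit_list (hash_value bit_list)

-- ===== LEMMAS AND PROOFS =====

-- one halving pass of A, factored out for the proof
def pvStep (l : List Int) : List Int :=
  ((l.take (l.length / 2)).zip (l.drop (l.length / 2))).map (fun p => PySem.Int.bxor p.1 p.2)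

lemma pvStep_length (l : List Int) :
    (pvStep l).length = min (l.length / 2) (l.length - l.length / 2) := by
  simp [pvStep]

lemma pvStep_getElem (l : List Int) (j : Nat) (hj : j < (pvStep l).length) :
    (pvStep l)[j] = PySem.Int.bxor (l[j]'(by simp [pvStep_length] at hj; omega))
      (l[j + l.length / 2]'(by simp [pvStep_length] at hj; omega)) := by
  simp [pvStep, Nat.add_comm]

lemma hash_value_eq_step (l : List Int) : hash_value l = pvStep (pvStep l) := by
  simp [hash_value, pvStep, List.range_succ]

lemma bxor_oo (m n : Nat) : PySem.Int.bxor (m : Int) (n : Int) = ((m ^^^ n : Nat) : Int) := by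
  simp [PySem.Int.bxor]

lemma bxor_on (m n : Nat) : PySem.Int.bxor (m : Int) (Int.negSucc n) = Int.negSucc (m ^^^ n) := by
  have h2 : ¬ (0:Int) ≤ Int.negSucc n := by omega
  have h3 : (-(Int.negSucc n) - 1).toNat = n := by omega
  simp only [PySem.Int.bxor, if_pos (Int.natCast_nonneg m), if_neg h2, h3, Int.toNat_natCast]
  omega

lemma bxor_no (m n : Nat) : PySem.Int.bxor (Int.negSucc m) (n : Int) = Int.negSucc (m ^^^ n) := by
  have h2 : ¬ (0:Int) ≤ Int.negSucc m := by omega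
  have h3 : (-(Int.negSucc m) - 1).toNat = m := by omega
  simp only [PySem.Int.bxor, if_pos (Int.natCast_nonneg n), if_neg h2, h3, Int.toNat_natCast]
  omega

lemma bxor_nn (m n : Nat) : PySem.Int.bxor (Int.negSucc m) (Int.negSucc n) = ((m ^^^ n : Nat) : Int) := by
  have h2 : ¬ (0:Int) ≤ Int.negSucc n := by omega
  have h2' : ¬ (0:Int) ≤ Int.negSucc m := by omega
  have h3 : (-(Int.negSucc m) - 1).toNat = m := by omega
  have h4 : (-(Int.negSucc n) - 1).toNat = n := by omega
  simp only [PySem.Int.bxor, if_neg h2, if_neg h2', h3, h4]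

lemma bxor_assoc (a b c : Int) :
    PySem.Int.bxor (PySem.Int.bxor a b) c = PySem.Int.bxor a (PySem.Int.bxor b c) := by
  cases a <;> cases b <;> cases c <;>
    simp only [Int.ofNat_eq_natCast, bxor_oo, bxor_on, bxor_no, bxor_nn, Nat.xor_assoc]

lemma bxor_left_comm (a b c : Int) :
    PySem.Int.bxor a (PySem.Int.bxor b c) = PySem.Int.bxor b (PySem.Int.bxor a c) := by
  rw [← bxor_assoc, PySem.Int.bxor_comm a b, bxor_assoc]

-- ===== VERDICT (by name: the statement is the Claim_ definition above) =====
theorem hash_value_spec : Claim_equal_hash_value := by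
  intro l _ hpre
  unfold Spec_hash_value
  have hn : l.length % 2 = 0 := hpre
  rw [hash_value_eq_step]
  unfold hash_value_alt
  have h1 : (pvStep l).length = l.length / 2 := by rw [pvStep_length]; omega
  have h2 : (pvStep (pvStep l)).length = l.length / 2 / 2 := by
    rw [pvStep_length, h1]; omega
  apply List.ext_getElem
  · simp [h2]
  · intro j hj _
    have hj2 : j < l.length / 2 / 2 := by rwa [h2] at hj
    rw [pvStep_getElem, pvStep_getElem, pvStep_getElem]
    have e1 : j < l.length := by omega
    have e3 : j + l.length / 2 < l.length := by omega
    have e2 : j + l.length / 2 / 2 < l.length := by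
      have := h1; omega
    have e4 : j + l.length / 2 / 2 + l.length / 2 < l.length := by omega
    simp only [List.getElem_map, List.getElem_range, h1,
      List.getD_eq_getElem?_getD, List.getElem?_eq_getElem e1, List.getElem?_eq_getElem e2,
      List.getElem?_eq_getElem e3, List.getElem?_eq_getElem e4, Option.getD_some]
    simp only [bxor_assoc, bxor_left_comm, PySem.Int.bxor_comm]
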